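-- pv_equiv track=rewrite | github.com/DarioBernardo/hackerrank_exercises | greedy/seating_arrengments.py | minOverallAwkwardness
-- ===== SOURCE A (Python) =====
-- def minOverallAwkwardness(arr):
--     # Write your code here
--
--     if len(arr) <= 1:
--         return 0
--     if len(arr) == 2:
--         return abs(arr[0] - arr[1])
--
--     sorted_array = sorted(arr)
--
--     akw_vals_list = []
--     for i in range(0, len(sorted_array)):
--         if i % 2:
--             akw_vals_list.insert(0, sorted_array[i])
--         else:
--             akw_vals_list.append(sorted_array[i])
--
--     result = [abs(akw_vals_list[-1] - akw_vals_list[0])]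
--     for i in range(1, len(akw_vals_list)):
--         result.append(abs(akw_vals_list[i] - akw_vals_list[i-1]))
--
--     return max(result)
-- ===== SOURCE B (Python) =====
-- def minOverallAwkwardness(arr):
--     if len(arr) <= 1:
--         return 0
--     if len(arr) == 2:
--         return abs(arr[0] - arr[1])
--     s = sorted(arr)
--     return max(b - a for a, b in zip(s, s[2:]))
-- ===== Notes on version B (the rewrite author's own statement) =====
-- stated objective: faster
-- what changed: Instead of materialising the zigzag arrangement with repeated list.insert(0,...) and scanning its circular adjacent differences, B sorts and returns the maximum gap between sorted elements two ranks apart (max over zip(s, s[2:])), which equals the arrangement's max awkwardness since every zigzag adjacency is a two-rank gap except the two one-rank junctions, which are always dominated.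
import Mathlib
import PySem

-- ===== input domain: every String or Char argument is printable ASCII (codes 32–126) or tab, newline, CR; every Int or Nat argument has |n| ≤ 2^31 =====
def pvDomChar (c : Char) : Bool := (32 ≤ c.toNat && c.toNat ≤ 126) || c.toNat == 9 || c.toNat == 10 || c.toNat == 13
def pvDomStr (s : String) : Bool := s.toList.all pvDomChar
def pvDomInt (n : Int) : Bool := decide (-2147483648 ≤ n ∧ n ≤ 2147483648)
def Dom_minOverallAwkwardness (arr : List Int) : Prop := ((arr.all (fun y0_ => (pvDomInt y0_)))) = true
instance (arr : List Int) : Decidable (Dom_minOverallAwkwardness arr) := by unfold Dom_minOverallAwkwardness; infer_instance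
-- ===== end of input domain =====

-- B replaces A's quadratic zigzag construction (repeated insert(0)) and circular adjacent scan
-- by the maximum gap between sorted elements two ranks apart.

-- ===== PORT A =====
def minOverallAwkwardness (arr : List Int) : Int :=
  if arr.length ≤ 1 then 0
  else if arr.length = 2 then |PySem.List.pyGetD arr 0 0 - PySem.List.pyGetD arr 1 0|
  else
    let sorted_array := PySem.List.sorted arr (fun x => x) false
    let akw_vals_list := (PySem.List.pyRange 0 (sorted_array.length : Int) 1).foldl
      (fun acc i =>
        if PySem.Int.mod i 2 ≠ 0 then PySem.List.pyGetD sorted_array i 0 :: acc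
        else acc ++ [PySem.List.pyGetD sorted_array i 0]) []
    let result := (PySem.List.pyRange 1 (akw_vals_list.length : Int) 1).foldl
      (fun r i => r ++ [|PySem.List.pyGetD akw_vals_list i 0 - PySem.List.pyGetD akw_vals_list (i - 1) 0|])
      [|PySem.List.pyGetD akw_vals_list (-1) 0 - PySem.List.pyGetD akw_vals_list 0 0|]
    (PySem.List.max? result (fun x => x)).getD 0   -- result is nonempty here, so Python's max returns

-- ===== PORT B =====
def minOverallAwkwardness_alt (arr : List Int) : Int :=
  if arr.length ≤ 1 then 0
  else if arr.length = 2 then |PySem.List.pyGetD arr 0 0 - PySem.List.pyGetD arr 1 0|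
  else
    let s := PySem.List.sorted arr (fun x => x) false
    -- max(b - a for a, b in zip(s, s[2:])); the generator is nonempty since len(s) ≥ 3
    (PySem.List.max? ((s.zip (PySem.List.slice s (some 2) none)).map (fun p => p.2 - p.1))
      (fun x => x)).getD 0

-- ===== PRECONDITION & SPEC =====
def Spec_minOverallAwkwardness (arr : List Int) (out : Int) : Prop := out = minOverallAwkwardness_alt arr
instance (arr : List Int) (out : Int) : Decidable (Spec_minOverallAwkwardness arr out) := by unfold Spec_minOverallAwkwardness; infer_instance

-- ===== CLAIM (what is proved, stated in full; the proofs are below) =====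
def Claim_equal_minOverallAwkwardness : Prop := ∀ (arr : List Int), Dom_minOverallAwkwardness arr → Spec_minOverallAwkwardness arr (minOverallAwkwardness arr)

-- ===== LEMMAS AND PROOFS =====

-- elements of a list at even / odd positions, in order
mutual
def pvEvens : List Int → List Int
  | [] => []
  | a :: r => a :: pvOdds r
def pvOdds : List Int → List Int
  | [] => []
  | _ :: r => pvEvens r
end

@[simp] theorem pvEvens_cc (a b : Int) (t : List Int) : pvEvens (a :: b :: t) = a :: pvEvens t := by
  simp [pvEvens, pvOdds]

@[simp] theorem pvOdds_cc (a b : Int) (t : List Int) : pvOdds (a :: b :: t) = b :: pvOdds t := by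
  simp [pvEvens, pvOdds]

-- absolute differences of adjacent elements
def pvAdj : List Int → List Int
  | a :: b :: t => |b - a| :: pvAdj (b :: t)
  | _ => []

-- differences of elements two positions apart
def pvGaps : List Int → List Int
  | a :: b :: c :: t => (c - a) :: pvGaps (b :: c :: t)
  | _ => []

theorem pvGetLastD_cons_of_ne (a : Int) (l : List Int) (h : l ≠ []) :
    (a :: l).getLastD 0 = l.getLastD 0 := by
  rw [List.getLastD_cons, List.getLastD_eq_getLast?, List.getLastD_eq_getLast?,
      List.getLast?_eq_some_getLast h]
  simp

theorem pvEO_append (l : List Int) (x : Int) :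
    (pvEvens (l ++ [x]) = if l.length % 2 = 0 then pvEvens l ++ [x] else pvEvens l) ∧
    (pvOdds (l ++ [x]) = if l.length % 2 = 0 then pvOdds l else pvOdds l ++ [x]) := by
  induction l with
  | nil => simp [pvEvens, pvOdds]
  | cons a r ih =>
    obtain ⟨ihE, ihO⟩ := ih
    by_cases h : r.length % 2 = 0
    · have h' : ¬ ((a :: r).length % 2 = 0) := by simp only [List.length_cons]; omega
      simp [pvEvens, pvOdds, ihE, ihO, h]
      omega
    · have h' : (a :: r).length % 2 = 0 := by simp only [List.length_cons]; omega
      simp [pvEvens, pvOdds, ihE, ihO, h]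
      omega

theorem pvLoop (l : List Int) :
    (List.range l.length).foldl
      (fun acc k => if k % 2 = 0 then acc ++ [l.getD k 0] else l.getD k 0 :: acc) []
    = (pvOdds l).reverse ++ pvEvens l := by
  induction l using List.reverseRecOn with
  | nil => simp [pvEvens, pvOdds]
  | append_singleton l x ih =>
    have hlen : (l ++ [x]).length = l.length + 1 := by simp
    rw [hlen, List.range_succ, List.foldl_append]
    have hc : (List.range l.length).foldl
        (fun acc k => if k % 2 = 0 then acc ++ [(l ++ [x]).getD k 0] else (l ++ [x]).getD k 0 :: acc) []
      = (List.range l.length).foldl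
        (fun acc k => if k % 2 = 0 then acc ++ [l.getD k 0] else l.getD k 0 :: acc) [] := by
      apply PySem.List.foldl_congr_mem
      intro acc k hk
      rw [List.getD_append _ _ _ _ (List.mem_range.mp hk)]
    rw [hc, ih]
    have hx : (l ++ [x]).getD l.length 0 = x := by
      rw [List.getD_append_right _ _ _ _ (le_refl _)]
      simp
    obtain ⟨hE, hO⟩ := pvEO_append l x
    by_cases h : l.length % 2 = 0
    · simp [h, hE, hO, List.foldl_cons]
    · simp [h, hE, hO, List.foldl_cons]

theorem pvAdj_map_range (l : List Int) :
    (List.range (l.length - 1)).map (fun k => |l.getD (k+1) 0 - l.getD k 0|) = pvAdj l := by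
  induction l with
  | nil => simp [pvAdj]
  | cons a r ih =>
    rcases r with _ | ⟨b, t⟩
    · simp [pvAdj]
    · have hlen : (a :: b :: t).length - 1 = t.length + 1 := by simp
      rw [hlen, List.range_succ_eq_map, List.map_cons, List.map_map]
      have h1 : |(a :: b :: t).getD (0+1) 0 - (a :: b :: t).getD 0 0| = |b - a| := by simp
      have h2 : (List.range t.length).map
            ((fun k => |(a :: b :: t).getD (k+1) 0 - (a :: b :: t).getD k 0|) ∘ Nat.succ)
          = (List.range ((b :: t).length - 1)).map
            (fun k => |(b :: t).getD (k+1) 0 - (b :: t).getD k 0|) := by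
        have : (b :: t).length - 1 = t.length := by simp
        rw [this]
        apply List.map_congr_left
        intro k _
        simp [Function.comp]
      rw [h1, h2, ih]
      simp [pvAdj]

theorem pvRange1_map (m : Nat) :
    PySem.List.pyRange 1 (m : Int) 1 = (List.range (m - 1)).map (fun k => ((k + 1 : Nat) : Int)) := by
  induction m with
  | zero => decide
  | succ n ih =>
    rcases Nat.eq_zero_or_pos n with h | h
    · subst h; decide
    · have hcast : ((n + 1 : Nat) : Int) = (n : Int) + 1 := by push_cast; ring
      rw [hcast, PySem.List.pyRange_one_succ_right (by exact_mod_cast h), ih]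
      have hn : n + 1 - 1 = (n - 1) + 1 := by omega
      rw [hn, List.range_succ, List.map_append]
      simp
      omega

theorem pvGaps_char (l : List Int) :
    (l.zip (l.drop 2)).map (fun p => p.2 - p.1) = pvGaps l := by
  induction l with
  | nil => simp [pvGaps]
  | cons a r ih =>
    rcases r with _ | ⟨b, _ | ⟨c, u⟩⟩
    · simp [pvGaps]
    · simp [pvGaps]
    · have hd : (a :: b :: c :: u).drop 2 = c :: u := by simp
      rw [hd, List.zip_cons_cons, List.map_cons]
      have hd' : (b :: c :: u).drop 2 = u := by simp
      rw [hd'] at ih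
      rw [ih]
      simp [pvGaps]

theorem pvGaps_sub (c : Int) (t : List Int) : ∀ x ∈ pvGaps t, x ∈ pvGaps (c :: t) := by
  intro x hx
  rcases t with _ | ⟨u, _ | ⟨v, w⟩⟩
  · simp [pvGaps] at hx
  · simp [pvGaps] at hx
  · show x ∈ pvGaps (c :: u :: v :: w)
    rw [pvGaps]
    exact List.mem_cons_of_mem _ hx

theorem pvAdj_cons_sub (a : Int) (L : List Int) : ∀ x ∈ pvAdj L, x ∈ pvAdj (a :: L) := by
  intro x hx
  rcases L with _ | ⟨y, v⟩
  · simp [pvAdj] at hx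
  · rw [pvAdj]
    exact List.mem_cons_of_mem _ hx

theorem pvAdj_append (l1 : List Int) (y : Int) (t : List Int) (h : l1 ≠ []) :
    pvAdj (l1 ++ y :: t) = pvAdj l1 ++ |y - l1.getLastD 0| :: pvAdj (y :: t) := by
  induction l1 with
  | nil => exact absurd rfl h
  | cons a r ih =>
    rcases r with _ | ⟨b, s⟩
    · simp [pvAdj, List.getLastD]
    · have ih' := ih (by simp)
      have hstep : pvAdj ((a :: b :: s) ++ y :: t) = |b - a| :: pvAdj ((b :: s) ++ y :: t) := rfl
      rw [hstep, ih', pvGetLastD_cons_of_ne a (b :: s) (by simp),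
        show pvAdj (a :: b :: s) = |b - a| :: pvAdj (b :: s) from rfl]
      simp

theorem pvAdj_reverse (l : List Int) : pvAdj l.reverse = (pvAdj l).reverse := by
  induction l with
  | nil => simp [pvAdj]
  | cons a r ih =>
    rcases r with _ | ⟨b, s⟩
    · simp [pvAdj]
    · have hrev : (a :: b :: s).reverse = (b :: s).reverse ++ a :: [] := by simp
      rw [hrev, pvAdj_append _ _ _ (by simp)]
      have hgl : ((b :: s).reverse).getLastD 0 = b := by
        rw [List.getLastD_eq_getLast?, List.getLast?_reverse]
        simp
      rw [hgl, ih]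
      have : pvAdj (a :: b :: s) = |b - a| :: pvAdj (b :: s) := rfl
      rw [this]
      simp [pvAdj, abs_sub_comm]

theorem pvMemAdjEvens : ∀ (s : List Int), s.Pairwise (· ≤ ·) →
    ∀ x ∈ pvAdj (pvEvens s), x ∈ pvGaps s
  | [] => by simp [pvEvens, pvAdj, pvGaps]
  | [a] => by simp [pvEvens, pvOdds, pvAdj, pvGaps]
  | [a, b] => by simp [pvEvens, pvOdds, pvAdj, pvGaps]
  | a :: b :: c :: u => by
    intro hs x hx
    have hE : pvEvens (a :: b :: c :: u) = a :: pvEvens (c :: u) := by simp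
    have hEcu : pvEvens (c :: u) = c :: pvOdds u := rfl
    rw [hE, hEcu, pvAdj] at hx
    have hac : a ≤ c := by
      have := (List.pairwise_cons.mp hs).1
      exact this c (by simp)
    rcases List.mem_cons.mp hx with h | h
    · subst h
      rw [abs_of_nonneg (by omega)]
      rw [pvGaps]
      exact List.mem_cons_self
    · have hrec := pvMemAdjEvens (c :: u) (hs.of_cons.of_cons) x (show x ∈ pvAdj (pvEvens (c :: u)) from h)
      exact pvGaps_sub a _ x (pvGaps_sub b _ x hrec)

theorem pvMemAdjOdds (s : List Int) (hs : s.Pairwise (· ≤ ·)) :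
    ∀ x ∈ pvAdj (pvOdds s), x ∈ pvGaps s := by
  rcases s with _ | ⟨a, r⟩
  · simp [pvOdds, pvAdj, pvGaps]
  · intro x hx
    have hO : pvOdds (a :: r) = pvEvens r := rfl
    rw [hO] at hx
    exact pvGaps_sub a r x (pvMemAdjEvens r (List.Pairwise.of_cons hs) x hx)

theorem pvGapsMemAdj : ∀ (s : List Int), s.Pairwise (· ≤ ·) →
    ∀ x ∈ pvGaps s, x ∈ pvAdj (pvEvens s) ∨ x ∈ pvAdj (pvOdds s)
  | [] => by simp [pvGaps]
  | [a] => by simp [pvGaps]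
  | [a, b] => by simp [pvGaps]
  | a :: b :: c :: u => by
    intro hs x hx
    rw [pvGaps] at hx
    have hE : pvEvens (a :: b :: c :: u) = a :: c :: pvOdds u := by
      simp [pvEvens, pvOdds]
    rcases List.mem_cons.mp hx with h | h
    · left
      subst h
      have hac : a ≤ c := (List.pairwise_cons.mp hs).1 c (by simp)
      rw [hE, pvAdj, abs_of_nonneg (by omega)]
      exact List.mem_cons_self
    · rcases pvGapsMemAdj (b :: c :: u) hs.of_cons x h with h' | h'
      · right
        have : pvEvens (b :: c :: u) = pvOdds (a :: b :: c :: u) := by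
          simp [pvEvens, pvOdds]
        rwa [this] at h'
      · left
        have h1 : pvOdds (b :: c :: u) = pvEvens (c :: u) := rfl
        rw [h1] at h'
        have h2 : pvEvens (a :: b :: c :: u) = a :: pvEvens (c :: u) := by simp
        rw [h2]
        exact pvAdj_cons_sub a _ x h'

theorem pvLastBound : ∀ (s : List Int), s.Pairwise (· ≤ ·) → 3 ≤ s.length →
    ∃ g ∈ pvGaps s, |(pvEvens s).getLastD 0 - (pvOdds s).getLastD 0| ≤ g
  | [] => by intro _ h; simp at h
  | [a] => by intro _ h; simp at h
  | [a, b] => by intro _ h; simp at h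
  | [a, b, c] => by
    intro hs _
    refine ⟨c - a, by rw [pvGaps]; exact List.mem_cons_self, ?_⟩
    have hEv : pvEvens [a, b, c] = [a, c] := rfl
    have hOd : pvOdds [a, b, c] = [b] := rfl
    rw [hEv, hOd]
    have hab : a ≤ b := (List.pairwise_cons.mp hs).1 b (by simp)
    have hbc : b ≤ c := (List.pairwise_cons.mp hs.of_cons).1 c (by simp)
    have : (([a, c] : List Int)).getLastD 0 = c := rfl
    rw [this]
    have : (([b] : List Int)).getLastD 0 = b := rfl
    rw [this, abs_of_nonneg (by omega)]
    omega
  | a :: b :: c :: d :: v => by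
    intro hs _
    obtain ⟨g, hg, hle⟩ := pvLastBound (b :: c :: d :: v) hs.of_cons (by simp)
    refine ⟨g, pvGaps_sub a _ g hg, ?_⟩
    have hEs : pvEvens (a :: b :: c :: d :: v) = a :: pvOdds (b :: c :: d :: v) := rfl
    have hOs : pvOdds (a :: b :: c :: d :: v) = pvEvens (b :: c :: d :: v) := rfl
    have hOne : pvOdds (b :: c :: d :: v) ≠ [] := by
      rw [pvOdds_cc]
      simp
    have hlast : (a :: pvOdds (b :: c :: d :: v)).getLastD 0
        = (pvOdds (b :: c :: d :: v)).getLastD 0 := pvGetLastD_cons_of_ne a _ hOne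
    rw [hEs, hOs, hlast, abs_sub_comm]
    exact hle

theorem pvMain (arr : List Int) (h3' : 3 ≤ arr.length) :
    minOverallAwkwardness arr = minOverallAwkwardness_alt arr := by
  have h1 : ¬ arr.length ≤ 1 := by omega
  have h2 : ¬ arr.length = 2 := by omega
  unfold minOverallAwkwardness minOverallAwkwardness_alt
  simp only [if_neg h1, if_neg h2]
  set s := PySem.List.sorted arr (fun x => x) false with hsdef
  have hlen : s.length = arr.length := PySem.List.length_sorted _ _ _
  have h3 : 3 ≤ s.length := by omega
  have hp : s.Pairwise (· ≤ ·) := by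
    have := PySem.List.sorted_pairwise arr (fun x => x)
    simpa using this
  obtain ⟨a, b, c, u, habc⟩ : ∃ a b c u, s = a :: b :: c :: u := by
    rcases s with _ | ⟨a, _ | ⟨b, _ | ⟨c, u⟩⟩⟩ <;> simp at h3 ⊢
  have hO : pvOdds s ≠ [] := by rw [habc]; simp
  have hE0 : pvEvens s = a :: pvEvens (c :: u) := by rw [habc]; simp
  have hEne : pvEvens s ≠ [] := by rw [hE0]; simp
  set akw := (pvOdds s).reverse ++ pvEvens s with hakw
  have hakwne : akw ≠ [] := by rw [hakw]; simp [hEne]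
  have hloop : (PySem.List.pyRange 0 (s.length : Int) 1).foldl
      (fun acc i => if PySem.Int.mod i 2 ≠ 0 then PySem.List.pyGetD s i 0 :: acc
        else acc ++ [PySem.List.pyGetD s i 0]) ([] : List Int) = akw := by
    rw [PySem.List.pyRange_zero_natCast, List.foldl_map]
    exact (PySem.List.foldl_congr_mem _ _ _ _ (by
      intro acc k hk
      by_cases hk2 : k % 2 = 0 <;>
        simp [PySem.List.pyGetD_natCast, hk2] <;>
        (intro hcontra; omega))).trans (pvLoop s)
  rw [hloop]
  set w := |PySem.List.pyGetD akw (-1) 0 - PySem.List.pyGetD akw 0 0| with hwdef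
  have hres : (PySem.List.pyRange 1 ((akw.length : Nat) : Int) 1).foldl
      (fun r i => r ++ [|PySem.List.pyGetD akw i 0 - PySem.List.pyGetD akw (i - 1) 0|])
      [w] = w :: pvAdj akw := by
    rw [PySem.List.foldl_append_singleton_eq_map
      (f := fun i => |PySem.List.pyGetD akw i 0 - PySem.List.pyGetD akw (i - 1) 0|),
      pvRange1_map, List.map_map]
    have hfun : ∀ k ∈ List.range (akw.length - 1),
        ((fun i => |PySem.List.pyGetD akw i 0 - PySem.List.pyGetD akw (i - 1) 0|) ∘
          (fun k : Nat => ((k + 1 : Nat) : Int))) k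
        = |akw.getD (k + 1) 0 - akw.getD k 0| := by
      intro k _
      have hc : ((k + 1 : Nat) : Int) - 1 = ((k : Nat) : Int) := by push_cast; ring
      simp only [Function.comp_apply, hc, PySem.List.pyGetD_natCast]
    rw [List.map_congr_left hfun, pvAdj_map_range]
    simp
  rw [hres, PySem.List.max?_id_cons, Option.getD_some]
  -- w in terms of pvEvens/pvOdds
  have hw : w = |(pvEvens s).getLastD 0 - (pvOdds s).getLastD 0| := by
    have hl1 : PySem.List.pyGetD akw (-1) 0 = (pvEvens s).getLastD 0 := by
      rw [PySem.List.pyGetD_neg_one akw 0 hakwne]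
      rw [List.getLastD_eq_getLast?, List.getLast?_eq_some_getLast hEne, Option.getD_some]
      exact List.getLast_append_of_ne_nil hakwne hEne
    have hl2 : PySem.List.pyGetD akw 0 0 = (pvOdds s).getLastD 0 := by
      obtain ⟨q, qt, hq⟩ : ∃ q qt, (pvOdds s).reverse = q :: qt := by
        rcases hrev : (pvOdds s).reverse with _ | ⟨q, qt⟩
        · exact absurd (List.reverse_eq_nil_iff.mp hrev) hO
        · exact ⟨q, qt, rfl⟩
      have : akw = q :: (qt ++ pvEvens s) := by rw [hakw, hq]; simp
      rw [this, PySem.List.pyGetD_zero_cons]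
      have : (pvOdds s).getLast? = some q := by
        rw [← List.head?_reverse, hq]; rfl
      rw [List.getLastD_eq_getLast?, this, Option.getD_some]
    rw [hwdef, hl1, hl2]
  -- B side
  have hBlist : (s.zip (PySem.List.slice s (some 2) none)).map (fun p => p.2 - p.1)
      = pvGaps s := by
    have : PySem.List.slice s (some 2) none = s.drop 2 := by
      rw [PySem.List.slice_from s (by norm_num : (0:Int) ≤ 2)]
      rfl
    rw [this, pvGaps_char]
  have hGaps : pvGaps s = (c - a) :: pvGaps (b :: c :: u) := by rw [habc]; rfl
  rw [hBlist, hGaps, PySem.List.max?_id_cons, Option.getD_some]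
  set M := (pvGaps (b :: c :: u)).foldl max (c - a) with hM
  -- bounds
  have hub : ∀ x ∈ pvGaps s, x ≤ M := by
    intro x hx
    rw [hGaps] at hx
    rcases List.mem_cons.mp hx with h | h
    · rw [h]; exact (PySem.List.le_foldl_max _ _).1
    · exact (PySem.List.le_foldl_max _ _).2 x h
  have hMmem : M ∈ pvGaps s := by
    rw [hGaps]
    rcases PySem.List.foldl_max_mem (pvGaps (b :: c :: u)) (c - a) with h | h
    · rw [hM, h]; exact List.mem_cons_self
    · exact List.mem_cons_of_mem _ h
  have hab : a ≤ b := by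
    rw [habc] at hp; exact (List.pairwise_cons.mp hp).1 b (by simp)
  have hbc : b ≤ c := by
    rw [habc] at hp; exact (List.pairwise_cons.mp hp.of_cons).1 c (by simp)
  have hca_mem : (c - a) ∈ pvGaps s := by rw [hGaps]; exact List.mem_cons_self
  have hOrevne : (pvOdds s).reverse ≠ [] := by simpa using hO
  have hAdjAkw : pvAdj akw = pvAdj ((pvOdds s).reverse) ++ |a - b| :: pvAdj (pvEvens s) := by
    rw [hakw, hE0, pvAdj_append _ _ _ hOrevne]
    have hgl : ((pvOdds s).reverse).getLastD 0 = b := by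
      rw [List.getLastD_eq_getLast?, List.getLast?_reverse, habc]
      rfl
    rw [hgl, ← hE0]
  have hAdjUb : ∀ x ∈ pvAdj akw, x ≤ M := by
    intro x hx
    rw [hAdjAkw] at hx
    rcases List.mem_append.mp hx with h | h
    · rw [pvAdj_reverse] at h
      exact hub x (pvMemAdjOdds s hp x (List.mem_reverse.mp h))
    · rcases List.mem_cons.mp h with h' | h'
      · have hjb : |a - b| ≤ c - a := by
          rw [abs_sub_comm, abs_of_nonneg (by omega)]; omega
        rw [h']
        exact le_trans hjb (hub _ hca_mem)
      · exact hub x (pvMemAdjEvens s hp x h')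
  have hwub : w ≤ M := by
    obtain ⟨g, hg, hle⟩ := pvLastBound s hp h3
    rw [hw]
    exact le_trans hle (hub g hg)
  have hMin : M ∈ pvAdj akw := by
    rcases pvGapsMemAdj s hp M hMmem with h | h
    · rw [hAdjAkw]
      exact List.mem_append_right _ (List.mem_cons_of_mem _ h)
    · rw [hAdjAkw]
      apply List.mem_append_left
      rw [pvAdj_reverse]
      exact List.mem_reverse.mpr h
  have hA_le : (pvAdj akw).foldl max w ≤ M := by
    rcases PySem.List.foldl_max_mem (pvAdj akw) w with h | h
    · rw [h]; exact hwub
    · exact hAdjUb _ h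
  exact le_antisymm hA_le ((PySem.List.le_foldl_max _ _).2 M hMin)

-- ===== VERDICT (by name: the statement is the Claim_ definition above) =====
theorem minOverallAwkwardness_spec : Claim_equal_minOverallAwkwardness := by
  intro arr _
  unfold Spec_minOverallAwkwardness
  by_cases h3 : 3 ≤ arr.length
  · exact pvMain arr h3
  · unfold minOverallAwkwardness minOverallAwkwardness_alt
    by_cases h1 : arr.length ≤ 1
    · simp [h1]
    · have h2 : arr.length = 2 := by omega
      simp [h2]
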